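-- pv_equiv track=rewrite | github.com/hamdanyasser/NLP-NER-Project | src/data/bc5cdr_parser.py | _split_on_punctuation
-- ===== SOURCE A (Python) =====
-- from typing import List, Dict, Tuple, Optional, Set
--
-- def _split_on_punctuation(word: str, start_offset: int) -> List[Tuple[str, int, int]]:
--     """
--     Split a word on punctuation while preserving character offsets.
--
--     Handles cases like:
--     - "word." -> ["word", "."]
--     - "(word)" -> ["(", "word", ")"]
--     - "word-word" -> ["word", "-", "word"] (optional, configurable)
--
--     Args:
--         word: Input word
--         start_offset: Starting character offset
--
--     Returns:
--         List of (token, start, end) tuples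
--     """
--     tokens = []
--     current_token = ""
--     current_start = start_offset
--
--     for i, char in enumerate(word):
--         if char in '.,;:!?()[]{}"\'/':
--             # Save current token if any
--             if current_token:
--                 tokens.append((
--                     current_token,
--                     current_start,
--                     current_start + len(current_token)
--                 ))
--                 current_token = ""
--
--             # Add punctuation as separate token
--             tokens.append((char, start_offset + i, start_offset + i + 1))
--             current_start = start_offset + i + 1
--         else:
--             if not current_token:
--                 current_start = start_offset + i
--             current_token += char
--
--     # Don't forget the last token
--     if current_token:
--         tokens.append((
--             current_token,
--             current_start,
--             current_start + len(current_token)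
--         ))
--
--     return tokens
-- ===== SOURCE B (Python) =====
-- def _split_on_punctuation(word, start_offset):
--     """Two-pointer run scanner: each token is either one punctuation char or a
--     maximal run of non-punctuation chars, sliced out directly with its offsets."""
--     PUNCT = set('.,;:!?()[]{}"\'/')
--     tokens = []
--     i, n = 0, len(word)
--     while i < n:
--         if word[i] in PUNCT:
--             j = i + 1
--         else:
--             j = i + 1
--             while j < n and word[j] not in PUNCT:
--                 j += 1
--         tokens.append((word[i:j], start_offset + i, start_offset + j))
--         i = j
--     return tokens
-- ===== Notes on version B (the rewrite author's own statement) =====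
-- stated objective: alternative
-- what changed: Replaced A's character-by-character accumulate-and-flush loop (current_token/current_start state with flush logic in three places) by a two-pointer run scanner that slices out each token - one punctuation char or one maximal non-punctuation run - directly with its offsets.
import Mathlib
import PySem

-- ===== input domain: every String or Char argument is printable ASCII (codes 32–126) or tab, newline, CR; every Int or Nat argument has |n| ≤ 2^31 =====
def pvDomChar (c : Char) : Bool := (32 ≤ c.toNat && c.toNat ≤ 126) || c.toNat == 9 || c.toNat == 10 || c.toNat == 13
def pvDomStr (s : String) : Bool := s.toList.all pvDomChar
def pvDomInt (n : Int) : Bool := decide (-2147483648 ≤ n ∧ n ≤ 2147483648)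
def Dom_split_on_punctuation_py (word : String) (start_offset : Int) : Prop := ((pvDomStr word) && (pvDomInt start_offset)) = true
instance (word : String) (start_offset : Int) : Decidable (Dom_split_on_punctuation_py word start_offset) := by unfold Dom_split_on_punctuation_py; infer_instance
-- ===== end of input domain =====

-- B replaces A's accumulate-and-flush character loop by a two-pointer run scanner
-- (one token per punctuation char / per maximal non-punctuation run); objective: alternative, same cost.

-- membership test `char in '.,;:!?()[]{}"\'/''` (shared punctuation set of both Pythons)
def pvIsPunct (c : Char) : Bool :=
  c = '.' || c = ',' || c = ';' || c = ':' || c = '!' || c = '?' ||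
  c = '(' || c = ')' || c = '[' || c = ']' || c = '{' || c = '}' ||
  c = '"' || c = '\'' || c = '/'

-- ===== PORT A =====
-- A's for-loop over (i, char) with state (tokens, current_token, current_start),
-- transliterated as structural recursion; `pos` is `start_offset + i`, and the
-- `[]` case is the trailing `if current_token:` flush after the loop.
def pvLoopA (cs : List Char) (pos : Int) (tokens : List (String × Int × Int))
    (cur : List Char) (curStart : Int) : List (String × Int × Int) :=
  match cs with
  | [] =>
      if cur ≠ [] then
        tokens ++ [(String.ofList cur, curStart, curStart + (cur.length : Int))]
      else tokens
  | c :: rest =>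
      if pvIsPunct c then
        let tokens' :=
          if cur ≠ [] then
            tokens ++ [(String.ofList cur, curStart, curStart + (cur.length : Int))]
          else tokens
        pvLoopA rest (pos + 1) (tokens' ++ [(String.ofList [c], pos, pos + 1)]) [] (pos + 1)
      else
        pvLoopA rest (pos + 1) tokens (cur ++ [c]) (if cur = [] then pos else curStart)

def split_on_punctuation_py (word : String) (start_offset : Int) : List (String × Int × Int) :=
  pvLoopA word.toList start_offset [] [] start_offset

-- ===== PORT B =====
-- Source B's outer while loop: cut the text into chunks (a single punctuation char,
-- or the current char followed by the maximal non-punctuation run = inner while).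
def pvChunksB : List Char → List (List Char)
  | [] => []
  | c :: rest =>
      if pvIsPunct c then
        [c] :: pvChunksB rest
      else
        (c :: rest.takeWhile (fun x => !pvIsPunct x)) ::
          pvChunksB (rest.dropWhile (fun x => !pvIsPunct x))
termination_by cs => cs.length
decreasing_by
  · simp
  · exact Nat.lt_succ_of_le (List.length_dropWhile_le _ _)

-- Source B's token emission: each chunk becomes (slice, start_offset+i, start_offset+j),
-- with the running position `off` playing the role of start_offset + i.
def pvEmitB (off : Int) : List (List Char) → List (String × Int × Int)
  | [] => []
  | t :: ts => (String.ofList t, off, off + (t.length : Int)) :: pvEmitB (off + (t.length : Int)) ts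

def split_on_punctuation_py_alt (word : String) (start_offset : Int) : List (String × Int × Int) :=
  pvEmitB start_offset (pvChunksB word.toList)

-- ===== PRECONDITION & SPEC =====
def Spec_split_on_punctuation_py (word : String) (start_offset : Int) (out : List (String × Int × Int)) : Prop := out = split_on_punctuation_py_alt word start_offset
instance (word : String) (start_offset : Int) (out : List (String × Int × Int)) : Decidable (Spec_split_on_punctuation_py word start_offset out) := by unfold Spec_split_on_punctuation_py; infer_instance

-- ===== CLAIM (what is proved, stated in full; the proofs are below) =====
def Claim_equal_split_on_punctuation_py : Prop := ∀ (word : String) (start_offset : Int), Dom_split_on_punctuation_py word start_offset → Spec_split_on_punctuation_py word start_offset (split_on_punctuation_py word start_offset)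

-- ===== LEMMAS AND PROOFS =====

-- equation lemmas for the well-founded recursion pvChunksB
theorem pvChunksB_nil : pvChunksB [] = [] := by
  simp [pvChunksB.eq_def]

theorem pvChunksB_punct (c : Char) (rest : List Char) (hp : pvIsPunct c = true) :
    pvChunksB (c :: rest) = [c] :: pvChunksB rest := by
  rw [pvChunksB.eq_def]; simp [hp]

theorem pvChunksB_run (c : Char) (rest : List Char) (hp : pvIsPunct c = false) :
    pvChunksB (c :: rest) =
      (c :: rest.takeWhile (fun x => !pvIsPunct x)) ::
        pvChunksB (rest.dropWhile (fun x => !pvIsPunct x)) := by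
  rw [pvChunksB.eq_def]; simp [hp]

-- Loop invariant, both shapes of A's state at once (mutual induction on `cs`):
-- * with an empty current token, A's loop appends exactly B's emission from `pos`;
-- * with a nonempty current token ending at `pos = curStart + |cur|`, A's loop appends
--   that token extended by the next non-punct run, then B's emission of the remainder.
theorem pvLoopA_inv (cs : List Char) :
    (∀ (pos : Int) (tokens : List (String × Int × Int)) (s : Int),
        pvLoopA cs pos tokens [] s = tokens ++ pvEmitB pos (pvChunksB cs)) ∧
    (∀ (cur : List Char) (tokens : List (String × Int × Int)) (curStart : Int),
        cur ≠ [] →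
        pvLoopA cs (curStart + (cur.length : Int)) tokens cur curStart =
          tokens ++
            (String.ofList (cur ++ cs.takeWhile (fun x => !pvIsPunct x)), curStart,
              curStart + ((cur ++ cs.takeWhile (fun x => !pvIsPunct x)).length : Int)) ::
            pvEmitB (curStart + ((cur ++ cs.takeWhile (fun x => !pvIsPunct x)).length : Int))
              (pvChunksB (cs.dropWhile (fun x => !pvIsPunct x)))) := by
  induction cs with
  | nil =>
      refine ⟨?_, ?_⟩
      · intro pos tokens s
        simp [pvLoopA, pvChunksB_nil, pvEmitB]
      · intro cur tokens curStart hne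
        simp [pvLoopA, pvChunksB_nil, pvEmitB, hne]
  | cons c rest ih =>
      refine ⟨?_, ?_⟩
      · intro pos tokens s
        cases hp : pvIsPunct c with
        | true =>
            simp only [pvLoopA, hp]
            rw [ih.1, pvChunksB_punct c rest hp]
            simp [pvEmitB]
        | false =>
            simp only [pvLoopA, hp]
            simp only [Bool.false_eq_true, if_false, List.nil_append]
            rw [if_pos trivial,
              show pos + 1 = pos + (([c] : List Char).length : Int) by simp,
              ih.2 [c] tokens pos (by simp), pvChunksB_run c rest hp]
            simp [pvEmitB]
      · intro cur tokens curStart hne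
        cases hp : pvIsPunct c with
        | true =>
            simp only [pvLoopA, hp, if_true, ne_eq, hne, not_false_eq_true]
            rw [ih.1]
            simp [hp, pvChunksB_punct c rest hp,
              pvEmitB, List.append_assoc, add_assoc]
        | false =>
            simp only [pvLoopA, hp, Bool.false_eq_true, if_false, ne_eq, hne, not_false_eq_true,
              if_true]
            rw [show curStart + (cur.length : Int) + 1
                  = curStart + ((cur ++ [c]).length : Int) by
                    push_cast [List.length_append, List.length_cons, List.length_nil]; ring,
              ih.2 (cur ++ [c]) tokens curStart (by simp)]
            simp [hp]

-- ===== VERDICT (by name: the statement is the Claim_ definition above) =====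
theorem split_on_punctuation_py_spec : Claim_equal_split_on_punctuation_py := by
  intro word start_offset _
  unfold Spec_split_on_punctuation_py split_on_punctuation_py split_on_punctuation_py_alt
  simpa using (pvLoopA_inv word.toList).1 start_offset [] start_offset
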